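-- pv_equiv track=rewrite | github.com/nishantchauhan00/GeeksForGeeks | Companies Question/68 Recursively remove all adjacent duplicates.py | solver1
-- ===== SOURCE A (Python) =====
-- def solver1(inpstr, n):  #  lets first do it without recursion
--     # in it we count occurences
--     while True:
--         if len(inpstr) == 0:
--             return ""
--         el = [inpstr[0]]
--         occurs = [1]
--         for i in range(1, len(inpstr)):
--             if el[-1] == inpstr[i]:
--                 occurs[-1] += 1
--             else:
--                 el.append(inpstr[i])
--                 occurs.append(1)
--
--         newstr = ""
--         for ch, i in zip(el, occurs):
--             if i == 1:
--                 newstr += ch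
--
--         if newstr == inpstr:
--             break
--         inpstr = newstr
--
--     return inpstr
-- ===== SOURCE B (Python) =====
-- def solver1(inpstr, n):
--     # Repeatedly keep exactly the characters that differ from both neighbours
--     # (a character survives a pass iff its run has length 1), until stable.
--     while True:
--         newstr = "".join(
--             c
--             for c, prev, nxt in zip(inpstr, "\0" + inpstr, inpstr[1:] + "\0")
--             if prev != c and c != nxt
--         )
--         if newstr == inpstr:
--             return newstr
--         inpstr = newstr
-- ===== Notes on version B (the rewrite author's own statement) =====
-- stated objective: simpler
-- what changed: Each pass is one comprehension that keeps exactly the characters differing from both neighbours (sentinel-padded zip), replacing A's two loops that build parallel run/count lists and re-join them; same fixpoint iteration, measured constant-factor speedup from the single-pass filter.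
import Mathlib
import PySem

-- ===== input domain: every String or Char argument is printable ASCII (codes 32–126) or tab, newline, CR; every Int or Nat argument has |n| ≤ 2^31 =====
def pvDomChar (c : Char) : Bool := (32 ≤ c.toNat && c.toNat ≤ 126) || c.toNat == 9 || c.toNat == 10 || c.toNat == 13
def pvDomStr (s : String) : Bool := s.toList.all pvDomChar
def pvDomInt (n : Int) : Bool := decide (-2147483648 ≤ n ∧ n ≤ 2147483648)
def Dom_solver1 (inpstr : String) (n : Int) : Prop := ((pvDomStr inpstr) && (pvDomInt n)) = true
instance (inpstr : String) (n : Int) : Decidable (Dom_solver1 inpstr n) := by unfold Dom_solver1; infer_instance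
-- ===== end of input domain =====

-- B computes each until-stable pass with one neighbour-comparison filter instead of A's
-- parallel run/count lists; same results, simpler code (no speed claim).

-- ===== PORT A =====
-- el/occurs building step: "if el[-1] == inpstr[i]: occurs[-1] += 1 else: append"
def aStep (p : List Char × List Nat) (c : Char) : List Char × List Nat :=
  if p.1.getLast! = c then (p.1, p.2.dropLast ++ [p.2.getLast! + 1])
  else (p.1 ++ [c], p.2 ++ [1])

-- one body of A's while-loop after the emptiness test: build (el, occurs), then newstr
def aPass (c : Char) (t : List Char) : List Char :=
  let eo := List.foldl aStep ([c], [1]) t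
  List.foldl (fun acc (p : Char × Nat) => if p.2 = 1 then acc ++ [p.1] else acc) []
    (eo.1.zip eo.2)

-- the while-loop; fuel (length+1) only makes the recursion total: each non-break
-- iteration strictly shortens the string, so the fuel is never exhausted
def aLoop : Nat → List Char → List Char
  | 0, s => s
  | f + 1, s =>
    match s with
    | [] => []
    | c :: t =>
      let newstr := aPass c t
      if newstr = c :: t then c :: t else aLoop f newstr

def solver1 (inpstr : String) (n : Int) : String :=
  String.mk (aLoop (inpstr.toList.length + 1) inpstr.toList)

-- ===== PORT B =====
def nulC : Char := Char.ofNat 0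

-- one pass: keep the characters that differ from both neighbours
-- (zip(inpstr, "\0"+inpstr, inpstr[1:]+"\0") with the triple as (c, (prev, nxt)))
def bPass (s : List Char) : List Char :=
  ((s.zip ((nulC :: s).zip (s.drop 1 ++ [nulC]))).filter
    (fun p => (p.2.1 != p.1) && (p.1 != p.2.2))).map Prod.fst

def bLoop : Nat → List Char → List Char
  | 0, s => s
  | f + 1, s =>
    let newstr := bPass s
    if newstr = s then newstr else bLoop f newstr

def solver1_alt (inpstr : String) (n : Int) : String :=
  String.mk (bLoop (inpstr.toList.length + 1) inpstr.toList)

-- ===== PRECONDITION & SPEC =====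
def Spec_solver1 (inpstr : String) (n : Int) (out : String) : Prop := out = solver1_alt inpstr n
instance (inpstr : String) (n : Int) (out : String) : Decidable (Spec_solver1 inpstr n out) := by unfold Spec_solver1; infer_instance

-- ===== CLAIM (what is proved, stated in full; the proofs are below) =====
def Claim_equal_solver1 : Prop := ∀ (inpstr : String) (n : Int), Dom_solver1 inpstr n → Spec_solver1 inpstr n (solver1 inpstr n)

-- ===== LEMMAS AND PROOFS =====

-- run-length encoding of t, an in-progress run of d seen k times at the front
def runsAcc (d : Char) (k : Nat) : List Char → List (Char × Nat)
  | [] => [(d, k)]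
  | c :: t => if c = d then runsAcc d (k + 1) t else (d, k) :: runsAcc c 1 t

def singles : List (Char × Nat) → List Char
  | [] => []
  | (c, k) :: r => (if k = 1 then [c] else []) ++ singles r

def headD : List Char → Char
  | [] => nulC
  | c :: _ => c

theorem getLast!_concat' {α : Type} [Inhabited α] (l : List α) (a : α) :
    (l ++ [a]).getLast! = a := by
  induction l with
  | nil => rfl
  | cons x xs ih => simpa [List.getLast!] using ih

theorem foldA (t : List Char) : ∀ (d : Char) (k : Nat) (el : List Char) (oc : List Nat),
    List.foldl aStep (el ++ [d], oc ++ [k]) t =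
      (el ++ (runsAcc d k t).map Prod.fst, oc ++ (runsAcc d k t).map Prod.snd) := by
  induction t with
  | nil => intro d k el oc; simp [runsAcc]
  | cons c t ih =>
    intro d k el oc
    by_cases hc : c = d
    · subst hc
      simp only [List.foldl_cons, aStep, getLast!_concat', List.dropLast_concat, runsAcc, if_true]
      exact ih c (k + 1) el oc
    · simp only [List.foldl_cons, aStep, getLast!_concat', if_neg (Ne.symm hc), runsAcc,
        if_neg hc, List.map_cons]
      rw [ih]
      simp

theorem foldS (rs : List (Char × Nat)) : ∀ (acc : List Char),
    List.foldl (fun acc (p : Char × Nat) => if p.2 = 1 then acc ++ [p.1] else acc) acc rs =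
      acc ++ singles rs := by
  induction rs with
  | nil => simp [singles]
  | cons p r ih =>
    intro acc
    obtain ⟨c, k⟩ := p
    by_cases hk : k = 1 <;> simp [singles, hk, ih, List.append_assoc]

theorem aPass_eq (c : Char) (t : List Char) : aPass c t = singles (runsAcc c 1 t) := by
  have h := foldA t c 1 [] []
  simp only [List.nil_append] at h
  simp only [aPass, h, List.zip_map']
  have he : ((runsAcc c 1 t).map fun a => (a.1, a.2)) = runsAcc c 1 t := by simp
  rw [he, foldS]
  simp

theorem bPass_cons (p c : Char) (t : List Char) :
    (((c :: t).zip ((p :: c :: t).zip (t ++ [nulC]))).filter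
        (fun q => (q.2.1 != q.1) && (q.1 != q.2.2))).map Prod.fst =
      (if (p != c) && (c != headD t) then [c] else []) ++
        (((t.zip ((c :: t).zip (t.drop 1 ++ [nulC]))).filter
          (fun q => (q.2.1 != q.1) && (q.1 != q.2.2))).map Prod.fst) := by
  cases t <;> simp [headD, List.filter_cons] <;> split_ifs <;> simp_all

-- the B-side pass with previous character p, as a recursion
def singlesB (p : Char) : List Char → List Char
  | [] => []
  | c :: t => (if (p != c) && (c != headD t) then [c] else []) ++ singlesB c t

theorem bPass_eq_singlesB (s : List Char) : ∀ p : Char,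
    ((s.zip ((p :: s).zip (s.drop 1 ++ [nulC]))).filter
      (fun q => (q.2.1 != q.1) && (q.1 != q.2.2))).map Prod.fst = singlesB p s := by
  induction s with
  | nil => intro p; rfl
  | cons c t ih =>
    intro p
    rw [show (c :: t).drop 1 = t from rfl, bPass_cons, singlesB, ih]

theorem singlesB_runs (t : List Char) : ∀ (d : Char) (k : Nat), 1 ≤ k → d ≠ nulC →
    (∀ x ∈ t, x ≠ nulC) →
    (if k = 1 ∧ headD t ≠ d then [d] else []) ++ singlesB d t = singles (runsAcc d k t) := by
  induction t with
  | nil =>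
    intro d k _ hd _
    simp [singlesB, runsAcc, singles, headD, Ne.symm hd]
  | cons c t ih =>
    intro d k hk hd hnul
    have hc0 : c ≠ nulC := hnul c (by simp)
    have ht0 : ∀ x ∈ t, x ≠ nulC := fun x hx => hnul x (by simp [hx])
    by_cases hc : c = d
    · subst hc
      have h1 : ¬ (k = 1 ∧ headD (c :: t) ≠ c) := by simp [headD]
      rw [if_neg h1, List.nil_append, runsAcc, if_pos rfl]
      have h2 := ih c (k + 1) (by omega) hc0 ht0
      rw [if_neg (by omega : ¬ (k + 1 = 1 ∧ headD t ≠ c)), List.nil_append] at h2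
      rw [← h2]
      simp [singlesB]
    · rw [runsAcc, if_neg hc, singles]
      have h2 := ih c 1 le_rfl hc0 ht0
      rw [← h2]
      have hcd : headD (c :: t) = c := rfl
      simp only [singlesB, hcd]
      by_cases hk1 : k = 1 <;>
        by_cases hth : headD t = c <;>
          simp [hk1, hth, hc, bne_iff_ne, ne_comm, @eq_comm _ c]

theorem pass_eq (s : List Char) (h : ∀ x ∈ s, x ≠ nulC) :
    bPass s = match s with | [] => [] | c :: t => aPass c t := by
  cases s with
  | nil => rfl
  | cons c t =>
    have hc0 : c ≠ nulC := h c (by simp)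
    have ht0 : ∀ x ∈ t, x ≠ nulC := fun x hx => h x (by simp [hx])
    show bPass (c :: t) = aPass c t
    rw [show bPass (c :: t) = singlesB nulC (c :: t) from bPass_eq_singlesB (c :: t) nulC,
      aPass_eq, ← singlesB_runs t c 1 le_rfl hc0 ht0]
    simp [singlesB, bne_iff_ne, Ne.symm hc0, ne_comm]

theorem bPass_subset (s : List Char) : ∀ x ∈ bPass s, x ∈ s := by
  intro x hx
  simp only [bPass, List.mem_map, List.mem_filter] at hx
  obtain ⟨q, ⟨hq, _⟩, rfl⟩ := hx
  exact (List.of_mem_zip hq).1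

theorem loop_eq (f : Nat) : ∀ (s : List Char), (∀ x ∈ s, x ≠ nulC) →
    aLoop f s = bLoop f s := by
  induction f with
  | zero => intro s _; rfl
  | succ f ih =>
    intro s hs
    cases s with
    | nil => simp [aLoop, bLoop, bPass]
    | cons c t =>
      have hp : bPass (c :: t) = aPass c t := pass_eq (c :: t) hs
      simp only [aLoop, bLoop, hp]
      by_cases h : aPass c t = c :: t
      · simp [h]
      · simp only [if_neg h]
        exact ih (aPass c t) fun x hx => hs x (bPass_subset (c :: t) x (hp ▸ hx))

-- ===== VERDICT (by name: the statement is the Claim_ definition above) =====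
theorem solver1_spec : Claim_equal_solver1 := by
  intro inpstr n hdom
  unfold Spec_solver1 solver1 solver1_alt
  have hsall : inpstr.toList.all pvDomChar = true := by
    simp only [Dom_solver1, pvDomStr, Bool.and_eq_true] at hdom
    exact hdom.1
  have hs : ∀ x ∈ inpstr.toList, x ≠ nulC := by
    intro x hx heq
    have hc := List.all_eq_true.mp hsall x hx
    rw [heq] at hc
    exact absurd hc (by decide)
  rw [loop_eq _ _ hs]
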